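-- pv_equiv track=rewrite | github.com/ptacek/advent-of-code-solutions | 2020/Day20/JurassicJigsaw.py | commonEdges
-- ===== SOURCE A (Python) =====
-- def getTopEdge(tile):
--     return tile[0]
--
-- def getRightEdge(tile):
--     edge = []
--     lastOffset = len(tile[0]) - 1
--
--     for row in tile:
--         edge.append(row[lastOffset])
--
--     return edge
--
-- def getBottomEdge(tile):
--     return tile[len(tile) - 1]
--
-- def getLeftEdge(tile):
--     edge = []
--
--     for row in tile:
--         edge.append(row[0])
--
--     return edge
--
-- def commonEdges(tile, other):
--     edges = [getTopEdge(tile), getRightEdge(tile), getBottomEdge(tile), getLeftEdge(tile)]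
--     otherEdges = [getTopEdge(other), getRightEdge(other), getBottomEdge(other), getLeftEdge(other)]
--     common = 0
--
--     for edge in edges:
--         for otherEdge in otherEdges:
--             if edge == otherEdge or edge == list(reversed(otherEdge)):
--                 common += 1
--
--     return common
-- ===== SOURCE B (Python) =====
-- def commonEdges(tile, other):
--     def edges(t):
--         last = len(t[0]) - 1
--         return [t[0],
--                 [row[last] for row in t],
--                 t[len(t) - 1],
--                 [row[0] for row in t]]
--
--     def canon(e):
--         return tuple(min(e, list(reversed(e))))
--
--     counts = {}
--     for e in edges(other):
--         k = canon(e)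
--         counts[k] = counts.get(k, 0) + 1
--
--     return sum(counts.get(canon(e), 0) for e in edges(tile))
-- ===== Notes on version B (the rewrite author's own statement) =====
-- stated objective: idiomatic
-- what changed: Each edge is reduced to a canonical key min(edge, reversed(edge)); a count dictionary over the four canonical edges of `other` is built once, and the nested 4x4 forward/reversed comparison loop is replaced by a single pass over `tile`'s canonical edges summing dictionary lookups.
import Mathlib
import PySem

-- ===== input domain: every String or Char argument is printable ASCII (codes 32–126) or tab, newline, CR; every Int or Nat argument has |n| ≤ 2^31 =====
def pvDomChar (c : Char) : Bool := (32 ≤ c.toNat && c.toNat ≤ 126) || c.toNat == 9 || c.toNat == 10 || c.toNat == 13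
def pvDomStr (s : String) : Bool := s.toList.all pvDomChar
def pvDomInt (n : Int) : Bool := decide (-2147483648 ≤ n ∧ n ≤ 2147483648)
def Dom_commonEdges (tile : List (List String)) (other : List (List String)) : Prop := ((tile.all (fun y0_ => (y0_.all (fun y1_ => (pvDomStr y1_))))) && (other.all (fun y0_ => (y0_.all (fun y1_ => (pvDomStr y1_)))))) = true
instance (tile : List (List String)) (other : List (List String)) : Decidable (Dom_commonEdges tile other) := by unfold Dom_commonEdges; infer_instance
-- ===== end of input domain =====

-- B replaces A's nested 4x4 forward/reversed edge comparison by canonical edge keys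
-- (min of edge and its reversal) counted in a dictionary built once over `other`'s
-- edges, then summed by lookup over `tile`'s edges (idiomatic index-then-lookup shape).


-- ===== PORT A =====
def getTopEdge (tile : List (List String)) : List String :=
  PySem.List.pyGetD tile 0 []

def getRightEdge (tile : List (List String)) : List String :=
  let lastOffset : Int := ((PySem.List.pyGetD tile 0 []).length : Int) - 1
  tile.foldl (fun edge row => edge ++ [PySem.List.pyGetD row lastOffset ""]) []

def getBottomEdge (tile : List (List String)) : List String :=
  PySem.List.pyGetD tile ((tile.length : Int) - 1) []

def getLeftEdge (tile : List (List String)) : List String :=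
  tile.foldl (fun edge row => edge ++ [PySem.List.pyGetD row 0 ""]) []

def commonEdges (tile : List (List String)) (other : List (List String)) : Int :=
  let edges := [getTopEdge tile, getRightEdge tile, getBottomEdge tile, getLeftEdge tile]
  let otherEdges := [getTopEdge other, getRightEdge other, getBottomEdge other, getLeftEdge other]
  edges.foldl (fun common edge =>
    otherEdges.foldl (fun c otherEdge =>
      if edge = otherEdge ∨ edge = otherEdge.reverse then c + 1 else c) common) 0

-- ===== PORT B =====
-- Source B's local helper `edges(t)`
def edgesB (t : List (List String)) : List (List String) :=
  let last : Int := ((PySem.List.pyGetD t 0 []).length : Int) - 1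
  [PySem.List.pyGetD t 0 [],
   t.map (fun row => PySem.List.pyGetD row last ""),
   PySem.List.pyGetD t ((t.length : Int) - 1) [],
   t.map (fun row => PySem.List.pyGetD row 0 "")]

-- Source B's `canon(e)` = min(e, list(reversed(e))) (Python min of two lists: the ≤-smaller one)
def canonEdge (e : List String) : List String :=
  if e ≤ e.reverse then e else e.reverse

def commonEdges_alt (tile : List (List String)) (other : List (List String)) : Int :=
  let counts : PySem.Dict (List String) Int :=
    (edgesB other).foldl (fun d e => d.insert (canonEdge e) (d.getD (canonEdge e) 0 + 1)) PySem.Dict.empty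
  (edgesB tile).foldl (fun s e => s + counts.getD (canonEdge e) 0) 0

-- ===== PRECONDITION & SPEC =====
-- Pre_ excludes exactly the inputs where the Python A raises IndexError: an empty tile,
-- a tile containing an empty row, or a row shorter than the first row (row[lastOffset]).
def Pre_commonEdges (tile : List (List String)) (other : List (List String)) : Prop :=
  tile ≠ [] ∧ (∀ row ∈ tile, row ≠ [] ∧ tile.headI.length ≤ row.length) ∧
  other ≠ [] ∧ (∀ row ∈ other, row ≠ [] ∧ other.headI.length ≤ row.length)
instance (tile : List (List String)) (other : List (List String)) : Decidable (Pre_commonEdges tile other) := by unfold Pre_commonEdges; infer_instance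

def pvWitness_commonEdges : List (List String) × List (List String) :=
  ([["a", "b"], ["c", "d"]], [["b", "a"], ["d", "c"]])

def Spec_commonEdges (tile : List (List String)) (other : List (List String)) (out : Int) : Prop := out = commonEdges_alt tile other
instance (tile : List (List String)) (other : List (List String)) (out : Int) : Decidable (Spec_commonEdges tile other out) := by unfold Spec_commonEdges; infer_instance

-- ===== CLAIM (what is proved, stated in full; the proofs are below) =====
def Claim_equal_commonEdges : Prop := ∀ (tile : List (List String)) (other : List (List String)), Dom_commonEdges tile other → Pre_commonEdges tile other → Spec_commonEdges tile other (commonEdges tile other)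

-- ===== LEMMAS AND PROOFS =====

theorem match_comm (e o : List String) : (o = e ∨ o = e.reverse) ↔ (e = o ∨ e = o.reverse) := by
  constructor <;> rintro (rfl | rfl) <;> simp

theorem canonEdge_mem (e : List String) : canonEdge e = e ∨ canonEdge e = e.reverse := by
  unfold canonEdge; split_ifs <;> simp

theorem canonEdge_reverse (e : List String) : canonEdge e.reverse = canonEdge e := by
  unfold canonEdge; simp only [List.reverse_reverse]; split_ifs with h1 h2 h2
  · exact le_antisymm h1 h2
  · rfl
  · rfl
  · exact absurd (le_of_not_ge h1) h2

theorem canonEdge_iff (e o : List String) :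
    canonEdge e = canonEdge o ↔ (e = o ∨ e = o.reverse) := by
  constructor
  · intro h
    rcases canonEdge_mem e with he | he <;> rcases canonEdge_mem o with ho | ho <;>
      rw [he] at h <;> rw [ho] at h
    · exact Or.inl h
    · exact Or.inr h
    · right; have := congrArg List.reverse h; simpa using this
    · left; have := congrArg List.reverse h; simpa using this
  · rintro (rfl | rfl)
    · rfl
    · exact canonEdge_reverse o

-- A's four edge extractions produce exactly Source B's `edges(t)` list.
theorem edgesA_eq (t : List (List String)) :
    [getTopEdge t, getRightEdge t, getBottomEdge t, getLeftEdge t] = edgesB t := by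
  simp only [getTopEdge, getRightEdge, getBottomEdge, getLeftEdge, edgesB,
    PySem.List.foldl_append_singleton_eq_map, List.nil_append]

-- the counter lookup equals the number of matching edges in O
theorem lookup_eq_countP (O : List (List String)) (e : List String) :
    ((O.foldl (fun d x => d.insert (canonEdge x) (d.getD (canonEdge x) 0 + 1))
        PySem.Dict.empty).getD (canonEdge e) 0)
      = (O.countP (fun o => decide (e = o ∨ e = o.reverse)) : Int) := by
  have h2 := PySem.Dict.getD_foldl_insert_add_one (l := O.map canonEdge)
    (d := PySem.Dict.empty) (v := canonEdge e)
  rw [List.foldl_map] at h2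
  rw [h2, PySem.Dict.getD_empty, zero_add]
  norm_num [List.count, List.countP_map]
  exact List.countP_congr (by
    intro o _
    simp only [Function.comp_apply, beq_iff_eq, canonEdge_iff, Bool.or_eq_true,
      decide_eq_true_eq]
    exact match_comm e o)

theorem main_fold_eq (E O : List (List String)) :
    E.foldl (fun common edge =>
      O.foldl (fun c otherEdge =>
        if edge = otherEdge ∨ edge = otherEdge.reverse then c + 1 else c) common) (0 : Int)
    = E.foldl (fun s e => s +
        (O.foldl (fun d x => d.insert (canonEdge x) (d.getD (canonEdge x) (0 : Int) + 1))
          PySem.Dict.empty).getD (canonEdge e) 0) 0 := by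
  apply PySem.List.foldl_congr_mem
  intro acc e _
  rw [lookup_eq_countP, PySem.List.foldl_ite_add_one]

-- ===== VERDICT (by name: the statement is the Claim_ definition above) =====
theorem commonEdges_spec : Claim_equal_commonEdges := by
  intro tile other _ _
  show commonEdges tile other = commonEdges_alt tile other
  simp only [commonEdges, commonEdges_alt, edgesA_eq]
  exact main_fold_eq (edgesB tile) (edgesB other)
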